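-- pv_equiv track=rewrite | github.com/david-kochar/PythonScripts | NonRepeatingSubstring.py | unique_substrings
-- ===== SOURCE A (Python) =====
-- def unique_substrings(test_string):
--
--     lst = []
--
--     for i in range(0, len(test_string)):
--         for j in range(i, len(test_string)):
--             unique = []
--             sub_string = test_string[i:j + 1]
--             for char in sub_string[::]:
--                 if char not in unique:
--                     unique.append(char)
--             if len(unique) == len(sub_string):
--                 lst.append(sub_string)
--     return(lst)
-- ===== SOURCE B (Python) =====
-- def unique_substrings(test_string):
--     n = len(test_string)
--     result = []
--     for i in range(n):
--         seen = set()
--         for j in range(i, n):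
--             ch = test_string[j]
--             if ch in seen:
--                 break
--             seen.add(ch)
--             result.append(test_string[i:j + 1])
--     return result
-- ===== Notes on version B (the rewrite author's own statement) =====
-- stated objective: faster
-- what changed: Per start index a sliding window with a seen-set stops at the first repeated character (repeats only grow with the window), replacing A's re-slicing and quadratic manual dedup of every substring.
import Mathlib
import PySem

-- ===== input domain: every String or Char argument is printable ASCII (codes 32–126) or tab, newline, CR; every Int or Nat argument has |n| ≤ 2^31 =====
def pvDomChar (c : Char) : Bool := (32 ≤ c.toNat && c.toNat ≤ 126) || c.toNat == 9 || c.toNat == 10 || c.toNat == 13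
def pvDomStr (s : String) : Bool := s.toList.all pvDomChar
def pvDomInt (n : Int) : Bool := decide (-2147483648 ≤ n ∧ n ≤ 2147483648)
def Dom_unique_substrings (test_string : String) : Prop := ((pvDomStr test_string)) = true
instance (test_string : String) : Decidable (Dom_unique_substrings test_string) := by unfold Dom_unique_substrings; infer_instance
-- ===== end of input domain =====

-- B replaces A's quadratic manual dedup of every slice by a per-start sliding window with a
-- seen-set that stops at the first repeated character (objective: faster).

-- ===== PORT A =====
-- test_string[i:j+1] with 0 ≤ i, j from the loop ranges: Python's slice equals drop-then-take here (exact)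
def pvSub (cs : List Char) (i j : Nat) : List Char := (cs.drop i).take (j + 1 - i)

-- 'unique = []; for char in sub_string[::]: if char not in unique: unique.append(char)'
def pvUniq (sub : List Char) : List Char := sub.foldl (fun u c => if c ∈ u then u else u ++ [c]) []

def unique_substrings (test_string : String) : List String :=
  (List.range test_string.toList.length).foldl (fun lst i =>
    (List.range' i (test_string.toList.length - i)).foldl (fun lst j =>
      if (pvUniq (pvSub test_string.toList i j)).length = (pvSub test_string.toList i j).length
      then lst ++ [String.mk (pvSub test_string.toList i j)]
      else lst) lst) []

-- ===== PORT B =====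
-- inner 'for j in range(i, n)' with break: pref are the window's chars, seen its set
def pvWinGo (pref : List Char) (seen : PySem.Set Char) : List Char → List String
  | [] => []
  | c :: rs =>
    if PySem.Set.contains seen c then []
    else String.mk (pref ++ [c]) :: pvWinGo (pref ++ [c]) (PySem.Set.add seen c) rs

-- outer 'for i in range(n)': one window per suffix
def pvStartsGo : List Char → List String
  | [] => []
  | c :: rs => pvWinGo [] PySem.Set.empty (c :: rs) ++ pvStartsGo rs

def unique_substrings_alt (test_string : String) : List String :=
  pvStartsGo test_string.toList

-- ===== PRECONDITION & SPEC =====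
def Spec_unique_substrings (test_string : String) (out : List String) : Prop := out = unique_substrings_alt test_string
instance (test_string : String) (out : List String) : Decidable (Spec_unique_substrings test_string out) := by unfold Spec_unique_substrings; infer_instance

-- ===== CLAIM (what is proved, stated in full; the proofs are below) =====
def Claim_equal_unique_substrings : Prop := ∀ (test_string : String), Dom_unique_substrings test_string → Spec_unique_substrings test_string (unique_substrings test_string)

-- ===== LEMMAS AND PROOFS =====

-- the common normal form of both programs: per suffix t, the distinct-character prefixes of t
def pvF (t : List Char) : List String :=
  (List.range t.length).flatMap
    (fun k => if (t.take (k + 1)).Nodup then [String.mk (t.take (k + 1))] else [])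

theorem pv_uniq_le (l u : List Char) :
    (l.foldl (fun u c => if c ∈ u then u else u ++ [c]) u).length ≤ u.length + l.length := by
  induction l generalizing u with
  | nil => simp
  | cons c cs ih =>
    simp only [List.foldl_cons]
    by_cases h : c ∈ u
    · simp only [if_pos h]
      have := ih u
      simp only [List.length_cons]; omega
    · simp only [if_neg h]
      have := ih (u ++ [c])
      simp only [List.length_append, List.length_cons, List.length_nil] at *
      omega

theorem pv_uniq_nodup (l u : List Char) (h : (u ++ l).Nodup) :
    l.foldl (fun u c => if c ∈ u then u else u ++ [c]) u = u ++ l := by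
  induction l generalizing u with
  | nil => simp
  | cons c cs ih =>
    have hc : c ∉ u := by
      intro hmem
      rcases List.nodup_append.mp h with ⟨_, _, hdisj⟩
      exact hdisj c hmem c (by simp) rfl
    simp only [List.foldl_cons, if_neg hc]
    have h' : ((u ++ [c]) ++ cs).Nodup := by simpa using h
    simpa using ih (u ++ [c]) h'

theorem pv_uniq_lt (l u : List Char) (h : ¬ (u ++ l).Nodup) (hu : u.Nodup) :
    (l.foldl (fun u c => if c ∈ u then u else u ++ [c]) u).length < u.length + l.length := by
  induction l generalizing u with
  | nil => simp at h; exact absurd hu h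
  | cons c cs ih =>
    simp only [List.foldl_cons]
    by_cases hc : c ∈ u
    · simp only [if_pos hc]
      have := pv_uniq_le cs u
      simp only [List.length_cons]; omega
    · simp only [if_neg hc]
      have hu' : (u ++ [c]).Nodup := by
        rw [List.nodup_append]
        refine ⟨hu, by simp, ?_⟩
        intro a ha b hb hab
        simp only [List.mem_singleton] at hb
        exact hc ((hab.trans hb) ▸ ha)
      have h' : ¬ ((u ++ [c]) ++ cs).Nodup := by simpa using h
      have := ih (u ++ [c]) h' hu'
      simp only [List.length_append, List.length_cons, List.length_nil] at *
      omega

theorem pv_cond_iff (sub : List Char) :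
    (pvUniq sub).length = sub.length ↔ sub.Nodup := by
  constructor
  · intro h
    by_contra hn
    have := pv_uniq_lt sub [] (by simpa using hn) (by simp)
    simp only [pvUniq] at h
    simp only [List.length_nil] at this
    omega
  · intro h
    have := pv_uniq_nodup sub [] (by simpa using h)
    simp [pvUniq, this]

theorem pv_foldl_if {β γ : Type} (P : β → Prop) [DecidablePred P] (f : β → γ)
    (xs : List β) (init : List γ) :
    xs.foldl (fun l j => if P j then l ++ [f j] else l) init
      = init ++ xs.flatMap (fun j => if P j then [f j] else []) := by
  induction xs generalizing init with
  | nil => simp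
  | cons x xs ih =>
    simp only [List.foldl_cons, List.flatMap_cons]
    by_cases h : P x
    · simp [h, ih]
    · simp [h, ih]

theorem pv_foldl_append {β γ : Type} (g : β → List γ)
    (xs : List β) (init : List γ) :
    xs.foldl (fun l i => l ++ g i) init = init ++ xs.flatMap g := by
  induction xs generalizing init with
  | nil => simp
  | cons x xs ih => simp [ih]

theorem pv_not_nodup_mid (pref l : List Char) (c : Char) (hc : c ∈ pref) (hcl : c ∈ l) :
    ¬ (pref ++ l).Nodup := by
  intro hnod
  rcases List.nodup_append.mp hnod with ⟨_, _, hdisj⟩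
  exact hdisj c hc c hcl rfl

theorem pv_win_eq (rest : List Char) : ∀ (pref : List Char) (seen : PySem.Set Char),
    (∀ c : Char, c ∈ seen ↔ c ∈ pref) → pref.Nodup →
    pvWinGo pref seen rest = (List.range rest.length).flatMap
      (fun k => if (pref ++ rest.take (k + 1)).Nodup
                then [String.mk (pref ++ rest.take (k + 1))] else []) := by
  induction rest with
  | nil => intro pref seen _ _; simp [pvWinGo]
  | cons c rs ih =>
    intro pref seen hseen hnd
    have hcontains : PySem.Set.contains seen c = true ↔ c ∈ pref := by
      constructor
      · intro h; exact (hseen c).mp (by simpa [PySem.Set.contains] using h)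
      · intro h; simpa [PySem.Set.contains] using (hseen c).mpr h
    simp only [List.length_cons, List.range_succ_eq_map, List.flatMap_cons, List.flatMap_map]
    by_cases hc : c ∈ pref
    · -- Python's break: every extension of the window repeats c, so the rest contributes nothing
      rw [pvWinGo, if_pos (hcontains.mpr hc)]
      rw [if_neg (pv_not_nodup_mid pref _ c hc (by simp))]
      symm
      rw [List.nil_append]
      apply List.flatMap_eq_nil_iff.mpr
      intro k _
      simp only [Nat.succ_eq_add_one, List.take_succ_cons]
      rw [if_neg (pv_not_nodup_mid pref _ c hc (by simp))]
    · have hnd' : (pref ++ [c]).Nodup := by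
        rw [List.nodup_append]
        refine ⟨hnd, by simp, ?_⟩
        intro a ha b hb hab
        simp only [List.mem_singleton] at hb
        exact hc ((hab.trans hb) ▸ ha)
      rw [pvWinGo, if_neg (by simpa using fun h => hc (hcontains.mp h))]
      have h1 : (pref ++ (c :: rs).take (0 + 1)).Nodup := by simpa using hnd'
      rw [if_pos h1]
      have hseen' : ∀ d : Char, d ∈ PySem.Set.add seen c ↔ d ∈ pref ++ [c] := by
        intro d
        rw [PySem.Set.mem_add]
        simp [hseen d]
      rw [ih (pref ++ [c]) (PySem.Set.add seen c) hseen' hnd']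
      simp only [Nat.succ_eq_add_one, List.take_succ_cons]
      have hfun : (fun k => if ((pref ++ [c]) ++ rs.take (k + 1)).Nodup
                    then [String.mk ((pref ++ [c]) ++ rs.take (k + 1))] else [])
          = (fun k => if (pref ++ c :: rs.take (k + 1)).Nodup
                    then [String.mk (pref ++ c :: rs.take (k + 1))] else []) := by
        funext k
        simp [List.append_assoc]
      rw [hfun]
      simp

theorem pv_starts_eq (cs : List Char) :
    pvStartsGo cs = (List.range cs.length).flatMap
      (fun i => pvWinGo [] PySem.Set.empty (cs.drop i)) := by
  induction cs with
  | nil => simp [pvStartsGo]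
  | cons c rs ih =>
    simp only [List.length_cons, List.range_succ_eq_map, List.flatMap_cons, List.flatMap_map,
      List.drop_zero]
    rw [pvStartsGo, ih]
    have hfun : (fun i => pvWinGo [] PySem.Set.empty (rs.drop i))
        = (fun i => pvWinGo [] PySem.Set.empty ((c :: rs).drop (Nat.succ i))) := by
      funext i
      simp [List.drop_succ_cons]
    rw [hfun]

theorem pv_win_F (t : List Char) : pvWinGo [] PySem.Set.empty t = pvF t := by
  rw [pv_win_eq t [] PySem.Set.empty (by simp [PySem.Set.empty]) (by simp)]
  simp [pvF]

theorem pv_A_inner (cs : List Char) (i : Nat) (lst : List String) :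
    (List.range' i (cs.length - i)).foldl (fun lst j =>
      if (pvUniq (pvSub cs i j)).length = (pvSub cs i j).length
      then lst ++ [String.mk (pvSub cs i j)]
      else lst) lst = lst ++ pvF (cs.drop i) := by
  rw [pv_foldl_if (fun j => (pvUniq (pvSub cs i j)).length = (pvSub cs i j).length)
      (fun j => String.mk (pvSub cs i j))]
  congr 1
  rw [List.range'_eq_map_range, List.flatMap_map]
  unfold pvF
  rw [List.length_drop]
  have hfun : (fun k => if (pvUniq (pvSub cs i (i + k))).length = (pvSub cs i (i + k)).length
                then [String.mk (pvSub cs i (i + k))] else [])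
      = (fun k => if ((cs.drop i).take (k + 1)).Nodup
                then [String.mk ((cs.drop i).take (k + 1))] else []) := by
    funext k
    have hidx : i + k + 1 - i = k + 1 := by omega
    simp only [pvSub, hidx]
    exact if_congr (pv_cond_iff _) rfl rfl
  rw [hfun]

theorem pv_A_eq (s : String) : unique_substrings s
    = (List.range s.toList.length).flatMap (fun i => pvF (s.toList.drop i)) := by
  unfold unique_substrings
  rw [List.foldl_ext _ (fun lst i => lst ++ pvF (s.toList.drop i)) []
      (fun lst i _ => pv_A_inner s.toList i lst)]
  rw [pv_foldl_append, List.nil_append]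

-- ===== VERDICT (by name: the statement is the Claim_ definition above) =====
theorem unique_substrings_spec : Claim_equal_unique_substrings := by
  intro s _
  unfold Spec_unique_substrings
  rw [pv_A_eq, unique_substrings_alt, pv_starts_eq]
  have hfun : (fun i => pvWinGo [] PySem.Set.empty (s.toList.drop i))
      = (fun i => pvF (s.toList.drop i)) := by
    funext i
    exact pv_win_F _
  rw [hfun]
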